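-- pv_equiv track=rewrite | github.com/cabinetsforcontractors/CFCOrderBackend_Sandbox | supplier_routes.py | _time_options
-- ===== SOURCE A (Python) =====
-- def _time_options(selected: str = "", start_hour: int = 7, end_hour: int = 17) -> str:
--     opts = ['<option value="">— Select time —</option>']
--     for hour in range(start_hour, end_hour + 1):
--         for minute in (0, 15, 30, 45):
--             if hour == end_hour and minute > 0:
--                 break
--             period = "AM" if hour < 12 else "PM"
--             dh = hour if hour <= 12 else hour - 12
--             if dh == 0:
--                 dh = 12
--             t = f"{dh}:{minute:02d} {period}"
--             sel = ' selected' if t == selected else ''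
--             opts.append(f'<option value="{t}"{sel}>{t}</option>')
--     return "\n".join(opts)
-- ===== SOURCE B (Python) =====
-- def _time_options(selected: str = "", start_hour: int = 7, end_hour: int = 17) -> str:
--     rows = []
--     for total in range(start_hour * 60, end_hour * 60 + 1, 15):
--         hour, minute = divmod(total, 60)
--         period = "AM" if hour < 12 else "PM"
--         dh = hour if hour <= 12 else hour - 12
--         if dh == 0:
--             dh = 12
--         t = f"{dh}:{minute:02d} {period}"
--         sel = ' selected' if t == selected else ''
--         rows.append(f'<option value="{t}"{sel}>{t}</option>')
--     return "\n".join(['<option value="">— Select time —</option>'] + rows)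
-- ===== Notes on version B (the rewrite author's own statement) =====
-- stated objective: simpler
-- what changed: Replaces the nested hour/minute loops with the break-at-end-hour hack by a single flat loop over total-minute offsets range(start_hour*60, end_hour*60+1, 15) with divmod, which includes exactly the trailing end_hour:00 option by construction.
import Mathlib
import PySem

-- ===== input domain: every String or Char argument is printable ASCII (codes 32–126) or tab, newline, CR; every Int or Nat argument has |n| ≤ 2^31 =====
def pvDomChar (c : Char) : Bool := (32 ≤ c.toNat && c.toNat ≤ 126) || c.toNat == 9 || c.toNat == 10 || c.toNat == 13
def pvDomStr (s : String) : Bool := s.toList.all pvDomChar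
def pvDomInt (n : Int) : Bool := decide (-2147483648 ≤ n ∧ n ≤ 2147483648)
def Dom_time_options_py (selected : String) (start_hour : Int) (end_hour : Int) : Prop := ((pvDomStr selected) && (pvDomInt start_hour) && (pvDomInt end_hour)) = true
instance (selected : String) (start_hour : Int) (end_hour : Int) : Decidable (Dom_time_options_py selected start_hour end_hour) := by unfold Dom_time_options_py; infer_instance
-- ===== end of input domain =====

-- B replaces A's nested hour/minute loops (with the break at end_hour) by one flat loop over
-- total-minute offsets in steps of 15, recovering hour/minute with divmod (objective: simpler).
-- Both Pythons format each row with identical expressions, shared here as pvRow/pvPad2.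

-- f"{minute:02d}" (exact for the nonnegative minutes 0,15,30,45 both programs produce)
def pvPad2 (m : Int) : String := if m < 10 then "0" ++ PySem.Int.toStr m else PySem.Int.toStr m

-- the loop body shared verbatim by both Pythons: period / dh / t / sel / the option row
def pvRow (selected : String) (hour minute : Int) : String :=
  let period := if hour < 12 then "AM" else "PM"
  let dh0 := if hour ≤ 12 then hour else hour - 12
  let dh : Int := if dh0 = 0 then 12 else dh0
  let t := PySem.Int.toStr dh ++ ":" ++ pvPad2 minute ++ " " ++ period
  let sel := if t == selected then " selected" else ""
  "<option value=\"" ++ t ++ "\"" ++ sel ++ ">" ++ t ++ "</option>"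

-- ===== PORT A =====
-- inner 'for minute in (0,15,30,45)' with the break, threading the opts accumulator
def pvInnerA (selected : String) (end_hour hour : Int) : List Int → List String → List String
  | [], opts => opts
  | m :: ms, opts =>
    if hour = end_hour ∧ 0 < m then opts
    else pvInnerA selected end_hour hour ms (opts ++ [pvRow selected hour m])

def time_options_py (selected : String) (start_hour : Int) (end_hour : Int) : String :=
  PySem.Str.join "\n"
    ((PySem.List.pyRange start_hour (end_hour + 1) 1).foldl
      (fun opts hour => pvInnerA selected end_hour hour [0, 15, 30, 45] opts)
      ["<option value=\"\">— Select time —</option>"])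

-- ===== PORT B =====
def time_options_py_alt (selected : String) (start_hour : Int) (end_hour : Int) : String :=
  PySem.Str.join "\n"
    (["<option value=\"\">— Select time —</option>"] ++
      (PySem.List.pyRange (start_hour * 60) (end_hour * 60 + 1) 15).map
        (fun total => pvRow selected (PySem.Int.floordiv total 60) (PySem.Int.mod total 60)))

-- ===== PRECONDITION & SPEC =====
def Spec_time_options_py (selected : String) (start_hour : Int) (end_hour : Int) (out : String) : Prop := out = time_options_py_alt selected start_hour end_hour
instance (selected : String) (start_hour : Int) (end_hour : Int) (out : String) : Decidable (Spec_time_options_py selected start_hour end_hour out) := by unfold Spec_time_options_py; infer_instance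

-- ===== CLAIM (what is proved, stated in full; the proofs are below) =====
def Claim_equal_time_options_py : Prop := ∀ (selected : String) (start_hour : Int) (end_hour : Int), Dom_time_options_py selected start_hour end_hour → Spec_time_options_py selected start_hour end_hour (time_options_py selected start_hour end_hour)

-- ===== LEMMAS AND PROOFS =====

lemma pyRange15_nil (a b : Int) (h : b ≤ a) : PySem.List.pyRange a b 15 = [] := by
  rw [PySem.List.pyRange_of_pos a b (by norm_num)]
  rw [if_neg (by omega)]
  simp

lemma pyRange15_cons (a b : Int) (h : a < b) :
    PySem.List.pyRange a b 15 = a :: PySem.List.pyRange (a + 15) b 15 := by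
  rw [PySem.List.pyRange_of_pos a b (by norm_num), PySem.List.pyRange_of_pos (a + 15) b (by norm_num)]
  rw [if_pos h]
  by_cases h2 : a + 15 < b
  · rw [if_pos h2]
    have hc : ((b - a + 15 - 1) / 15).toNat = ((b - (a + 15) + 15 - 1) / 15).toNat + 1 := by omega
    rw [hc, List.range_succ_eq_map, List.map_cons, List.map_map]
    congr 1
    · simp
    · apply List.map_congr_left
      intro k _
      simp only [Function.comp_apply]
      push_cast
      ring
  · rw [if_neg h2]
    have hc : ((b - a + 15 - 1) / 15).toNat = 1 := by omega
    rw [hc]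
    simp

lemma pvFd60 (h m : Int) (h0 : 0 ≤ m) (h1 : m < 60) :
    PySem.Int.floordiv (h * 60 + m) 60 = h := by
  rw [PySem.Int.floordiv_eq_ediv_of_pos (by norm_num)]; omega

lemma pvMd60 (h m : Int) (h0 : 0 ≤ m) (h1 : m < 60) :
    PySem.Int.mod (h * 60 + m) 60 = m := by
  rw [PySem.Int.mod_eq_emod_of_pos (by norm_num)]; omega

lemma pvFd60' (h : Int) : PySem.Int.floordiv (h * 60) 60 = h := by
  rw [PySem.Int.floordiv_eq_ediv_of_pos (by norm_num)]; omega

lemma pvMd60' (h : Int) : PySem.Int.mod (h * 60) 60 = 0 := by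
  rw [PySem.Int.mod_eq_emod_of_pos (by norm_num)]; omega

-- the per-hour chunk A's inner loop appends
def pvChunkA (selected : String) (end_hour hour : Int) : List String :=
  if hour = end_hour then [pvRow selected hour 0]
  else [pvRow selected hour 0, pvRow selected hour 15, pvRow selected hour 30, pvRow selected hour 45]

lemma pvInnerA_eq_chunk (sel : String) (e h : Int) (opts : List String) :
    pvInnerA sel e h [0, 15, 30, 45] opts = opts ++ pvChunkA sel e h := by
  by_cases hhe : h = e
  · subst hhe
    simp [pvInnerA, pvChunkA]
  · simp [pvInnerA, pvChunkA, hhe]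

lemma pvFoldA (sel : String) (e : Int) (hs : List Int) (init : List String) :
    hs.foldl (fun opts hour => pvInnerA sel e hour [0, 15, 30, 45] opts) init
      = init ++ hs.flatMap (pvChunkA sel e) := by
  have hf : (fun opts hour => pvInnerA sel e hour [0, 15, 30, 45] opts)
      = fun (opts : List String) hour => opts ++ pvChunkA sel e hour := by
    funext opts hour
    exact pvInnerA_eq_chunk sel e hour opts
  rw [hf, PySem.List.foldl_append_eq_flatMap]

lemma pvMain (sel : String) (e : Int) :
    ∀ (n : Nat) (s : Int), e = s + n →
      (PySem.List.pyRange s (e + 1) 1).flatMap (pvChunkA sel e)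
        = (PySem.List.pyRange (s * 60) (e * 60 + 1) 15).map
            (fun total => pvRow sel (PySem.Int.floordiv total 60) (PySem.Int.mod total 60)) := by
  intro n
  induction n with
  | zero =>
    intro s hs
    have hse : s = e := by omega
    subst hse
    rw [PySem.List.pyRange_one_singleton]
    rw [pyRange15_cons _ _ (by omega), pyRange15_nil _ _ (by omega)]
    simp [pvChunkA]
  | succ n ih =>
    intro s hs
    have hne : s ≠ e := by omega
    rw [PySem.List.pyRange_one_cons (by omega : s < e + 1), List.flatMap_cons]
    rw [pyRange15_cons (s * 60) _ (by omega)]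
    rw [pyRange15_cons (s * 60 + 15) _ (by omega)]
    rw [show s * 60 + 15 + 15 = s * 60 + 30 by ring]
    rw [pyRange15_cons (s * 60 + 30) _ (by omega)]
    rw [show s * 60 + 30 + 15 = s * 60 + 45 by ring]
    rw [pyRange15_cons (s * 60 + 45) _ (by omega)]
    rw [show s * 60 + 45 + 15 = (s + 1) * 60 by ring]
    rw [List.map_cons, List.map_cons, List.map_cons, List.map_cons]
    rw [← ih (s + 1) (by omega)]
    rw [pvFd60' s, pvMd60' s,
        pvFd60 s 15 (by norm_num) (by norm_num), pvMd60 s 15 (by norm_num) (by norm_num),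
        pvFd60 s 30 (by norm_num) (by norm_num), pvMd60 s 30 (by norm_num) (by norm_num),
        pvFd60 s 45 (by norm_num) (by norm_num), pvMd60 s 45 (by norm_num) (by norm_num)]
    simp [pvChunkA, hne]

-- ===== VERDICT (by name: the statement is the Claim_ definition above) =====
theorem time_options_py_spec : Claim_equal_time_options_py := by
  intro sel s e _
  unfold Spec_time_options_py time_options_py time_options_py_alt
  rw [pvFoldA]
  congr 1
  by_cases h : s ≤ e
  · rw [pvMain sel e (e - s).toNat s (by omega)]
  · rw [PySem.List.pyRange_one_eq_nil (by omega), pyRange15_nil _ _ (by omega)]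
    simp
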